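-- pv_equiv track=rewrite | github.com/JoakimSkoog97/AdventOfCode | main_refactored.py | remove_underscore_indices
-- ===== SOURCE A (Python) =====
-- def remove_underscore_indices(lines):
--     """
--     Removes any indices that contain only underscores from the lines.
--
--     :param lines: A list of strings.
--     :return: A list of strings with underscore-only indices removed.
--     """
--     # Initialize the list of modified lines
--     new_lines = []
--
--     # Transpose the lines to make it easier to work with each index
--     transposed_lines = list(map(list, zip(*lines)))
--
--     # Remove any indices that contain only underscores
--     for indices in transposed_lines:
--         if all(index == "_" for index in indices):
--             continue
--
--         new_lines.append("".join(indices))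
--
--     # Transpose the modified lines back to the original format
--     new_lines = list(map(list, zip(*new_lines)))
--
--     return new_lines
-- ===== SOURCE B (Python) =====
-- def remove_underscore_indices(lines):
--     """
--     Removes any indices (columns) that contain only underscores from the lines.
--
--     Fold the rows into an elementwise "all underscores so far" mask (zip
--     truncates the mask to the shortest row), then drop the masked positions
--     from each row.  No transposition of the grid at all.
--     """
--     mask = None
--     for line in lines:
--         if mask is None:
--             mask = [c == "_" for c in line]
--         else:
--             mask = [m and c == "_" for m, c in zip(mask, line)]
--     if mask is None:
--         return []
--     out = [[c for c, m in zip(line, mask) if not m] for line in lines]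
--     return out if out[0] else []
-- ===== Notes on version B (the rewrite author's own statement) =====
-- stated objective: alternative
-- what changed: Instead of transposing the grid, filtering all-underscore columns and transposing back, B folds the rows once into an elementwise boolean 'column is all underscores' mask (zip truncation giving the shortest-row width for free) and then strips the masked positions from each row; the grid is never transposed and no explicit column loop exists.
import Mathlib
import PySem

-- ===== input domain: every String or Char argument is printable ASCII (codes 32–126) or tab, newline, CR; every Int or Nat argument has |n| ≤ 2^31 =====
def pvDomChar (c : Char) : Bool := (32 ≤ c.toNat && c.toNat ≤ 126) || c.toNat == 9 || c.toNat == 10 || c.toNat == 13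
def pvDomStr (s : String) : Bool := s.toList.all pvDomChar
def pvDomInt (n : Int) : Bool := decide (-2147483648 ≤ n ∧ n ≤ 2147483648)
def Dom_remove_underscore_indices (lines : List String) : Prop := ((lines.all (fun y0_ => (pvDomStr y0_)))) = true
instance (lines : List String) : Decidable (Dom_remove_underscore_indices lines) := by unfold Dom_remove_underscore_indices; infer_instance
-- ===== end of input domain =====

-- B folds the rows into an elementwise all-underscore mask and strips the masked positions from
-- each row, replacing A's transpose/filter/transpose (objective: alternative, same cost).

-- ===== PORT A =====
-- zip(*xs) for lists of chars: columns up to the shortest row; fuel is the first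
-- row's length, which is ≥ the number of columns, and the loop stops as soon as
-- some row is exhausted (exactly Python's zip truncation).
def pyZipStarAux : Nat → List (List Char) → List (List Char)
  | 0, _ => []
  | n + 1, xs =>
    if xs.any List.isEmpty then []
    else (xs.map (fun r => r.headD ' ')) :: pyZipStarAux n (xs.map (List.drop 1))

def pyZipStar (xs : List (List Char)) : List (List Char) :=
  pyZipStarAux ((xs.head?.map List.length).getD 0) xs

def remove_underscore_indices (lines : List String) : List (List String) :=
  -- transposed_lines = zip(*lines); the loop skips all-underscore columns and appends
  -- "".join(indices); finally zip(*new_lines) again, each char a 1-char string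
  (pyZipStar
      (((pyZipStar (lines.map String.toList)).foldl
          (fun acc indices =>
            if indices.all (fun c => c == '_') then acc else acc ++ [String.ofList indices])
          []).map String.toList)).map
    (fun row => row.map (fun c => String.ofList [c]))

-- ===== PORT B =====
-- mask = None; for line in lines: mask = [c=='_' …] or [m and c=='_' for m,c in zip(mask,line)]
def bMask (rows : List (List Char)) : Option (List Bool) :=
  rows.foldl
    (fun mo line =>
      match mo with
      | none => some (line.map (fun c => c == '_'))
      | some m => some (List.zipWith (fun m c => m && (c == '_')) m line))
    none

def remove_underscore_indices_alt (lines : List String) : List (List String) :=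
  match bMask (lines.map String.toList) with
  | none => []
  | some mask =>
    -- out = [[c for c, m in zip(line, mask) if not m] for line in lines]; return out if out[0] else []
    let out := (lines.map String.toList).map
      (fun line => ((line.zip mask).filter (fun p => !p.2)).map (fun p => String.ofList [p.1]))
    if out.headD [] = [] then [] else out

-- ===== PRECONDITION & SPEC =====
def Spec_remove_underscore_indices (lines : List String) (out : List (List String)) : Prop := out = remove_underscore_indices_alt lines
instance (lines : List String) (out : List (List String)) : Decidable (Spec_remove_underscore_indices lines out) := by unfold Spec_remove_underscore_indices; infer_instance

-- ===== CLAIM (what is proved, stated in full; the proofs are below) =====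
def Claim_equal_remove_underscore_indices : Prop := ∀ (lines : List String), Dom_remove_underscore_indices lines → Spec_remove_underscore_indices lines (remove_underscore_indices lines)

-- ===== LEMMAS AND PROOFS =====

-- column j of the grid (one char per row, default beyond a row's end — only used for j below every row's length)
def colAt (xs : List (List Char)) (j : Nat) : List Char := xs.map (fun r => r.getD j ' ')

-- min of the row lengths (0 for the empty grid) — the common width both programs work at
def pyMinLen (xs : List (List Char)) : Nat :=
  match xs.map List.length with
  | [] => 0
  | n :: ns => ns.foldl min n

-- the indices of the kept columns, and the canonical result both ports are reduced to
def keepOf (xs : List (List Char)) : List Nat :=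
  (List.range (pyMinLen xs)).filter (fun j => !(colAt xs j).all (fun c => c == '_'))

def canon (lines : List String) : List (List String) :=
  if keepOf (lines.map String.toList) = [] then []
  else (lines.map String.toList).map
    (fun r => (keepOf (lines.map String.toList)).map (fun j => String.ofList [r.getD j ' ']))

theorem fmin_le (ns : List Nat) (n : Nat) : ns.foldl min n ≤ n := by
  induction ns generalizing n with
  | nil => simp
  | cons a t ih => exact le_trans (ih (min n a)) (by omega)

theorem fmin_mem (ns : List Nat) (n a : Nat) (h : a ∈ ns) : ns.foldl min n ≤ a := by
  induction ns generalizing n with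
  | nil => simp at h
  | cons b t ih =>
    rcases List.mem_cons.mp h with rfl | h'
    · exact le_trans (fmin_le t (min n a)) (by omega)
    · exact ih (min n b) h'

theorem fmin_pos (ns : List Nat) (n : Nat) (h1 : 1 ≤ n) (h : ∀ a ∈ ns, 1 ≤ a) :
    1 ≤ ns.foldl min n := by
  induction ns generalizing n with
  | nil => simpa using h1
  | cons b t ih =>
    have hb := h b (by simp)
    exact ih (min n b) (by omega) (fun a ha => h a (by simp [ha]))

theorem fmin_sub (ns : List Nat) (n : Nat) :
    (ns.map (fun x => x - 1)).foldl min (n - 1) = ns.foldl min n - 1 := by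
  induction ns generalizing n with
  | nil => simp
  | cons b t ih =>
    simp only [List.map_cons, List.foldl_cons]
    rw [show min (n - 1) (b - 1) = min n b - 1 by omega]
    exact ih (min n b)

theorem fmin_const (ns : List Nat) (k : Nat) (h : ∀ a ∈ ns, a = k) : ns.foldl min k = k := by
  induction ns with
  | nil => simp
  | cons b t ih =>
    have hb : b = k := h b (by simp)
    subst hb
    simp only [List.foldl_cons, min_self]
    exact ih (fun a ha => h a (by simp [ha]))

theorem pyMinLen_zero_of_empty (xs : List (List Char)) (h : xs.any List.isEmpty = true) :
    pyMinLen xs = 0 := by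
  cases xs with
  | nil => simp at h
  | cons r rs =>
    simp only [List.any_cons, Bool.or_eq_true, List.any_eq_true] at h
    unfold pyMinLen
    simp only [List.map_cons]
    rcases h with h | ⟨l, hl, he⟩
    · have hr : r.length = 0 := by simpa [List.isEmpty_iff] using h
      have hle := fmin_le (rs.map List.length) r.length
      omega
    · have hmem : l.length ∈ rs.map List.length := List.mem_map_of_mem hl
      have hle := fmin_mem (rs.map List.length) r.length l.length hmem
      have hl0 : l.length = 0 := by simpa [List.isEmpty_iff] using he
      omega

theorem pyMinLen_pos (xs : List (List Char)) (hne : xs ≠ []) (h : xs.any List.isEmpty = false) :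
    1 ≤ pyMinLen xs := by
  cases xs with
  | nil => exact absurd rfl hne
  | cons r rs =>
    simp only [List.any_cons, Bool.or_eq_false_iff, List.any_eq_false] at h
    unfold pyMinLen
    simp only [List.map_cons]
    apply fmin_pos
    · have hr : r ≠ [] := by
        intro hr; rw [hr] at h; simp at h
      have := List.length_pos_of_ne_nil hr
      omega
    · intro a ha
      rcases List.mem_map.mp ha with ⟨l, hl, rfl⟩
      have hlne : l ≠ [] := by
        intro hle; have := h.2 l hl; rw [hle] at this; simp at this
      have := List.length_pos_of_ne_nil hlne
      omega

theorem pyMinLen_drop (xs : List (List Char)) :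
    pyMinLen (xs.map (List.drop 1)) = pyMinLen xs - 1 := by
  cases xs with
  | nil => simp [pyMinLen]
  | cons r rs =>
    unfold pyMinLen
    simp only [List.map_cons, List.map_map]
    have : (rs.map (List.length ∘ List.drop 1)) = (rs.map List.length).map (fun x => x - 1) := by
      simp [List.map_map, Function.comp_def]
    rw [this, List.length_drop]
    exact fmin_sub (rs.map List.length) r.length

theorem pyMinLen_const (xs : List (List Char)) (k : Nat) (hne : xs ≠ [])
    (h : ∀ l ∈ xs, l.length = k) : pyMinLen xs = k := by
  cases xs with
  | nil => exact absurd rfl hne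
  | cons r rs =>
    unfold pyMinLen
    simp only [List.map_cons]
    have hr : r.length = k := h r (by simp)
    subst hr
    exact fmin_const _ _ (fun a ha => by
      rcases List.mem_map.mp ha with ⟨l, hl, rfl⟩
      exact h l (by simp [hl]))

theorem pyMinLen_le_mem (xs : List (List Char)) (l : List Char) (h : l ∈ xs) :
    pyMinLen xs ≤ l.length := by
  cases xs with
  | nil => simp at h
  | cons r rs =>
    unfold pyMinLen
    simp only [List.map_cons]
    rcases List.mem_cons.mp h with rfl | h'
    · exact fmin_le _ _
    · exact fmin_mem _ _ _ (List.mem_map_of_mem h')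

theorem colAt_zero (xs : List (List Char)) :
    xs.map (fun r => r.headD ' ') = colAt xs 0 := by
  unfold colAt
  apply List.map_congr_left
  intro r _
  cases r <;> rfl

theorem colAt_drop (xs : List (List Char)) (j : Nat) :
    colAt (xs.map (List.drop 1)) j = colAt xs (j + 1) := by
  unfold colAt
  rw [List.map_map]
  apply List.map_congr_left
  intro r _
  cases r <;> rfl

theorem pyZipStarAux_eq (fuel : Nat) : ∀ xs : List (List Char), xs ≠ [] → pyMinLen xs ≤ fuel →
    pyZipStarAux fuel xs = (List.range (pyMinLen xs)).map (colAt xs) := by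
  induction fuel with
  | zero =>
    intro xs _ hle
    have : pyMinLen xs = 0 := by omega
    simp [pyZipStarAux, this]
  | succ n ih =>
    intro xs hne hle
    by_cases h : xs.any List.isEmpty = true
    · have h0 := pyMinLen_zero_of_empty xs h
      simp [pyZipStarAux, h, h0]
    · have hfalse : xs.any List.isEmpty = false := by
        simp only [Bool.not_eq_true] at h; exact h
      have hpos := pyMinLen_pos xs hne hfalse
      have hdrop := pyMinLen_drop xs
      have hm : pyMinLen xs = (pyMinLen xs - 1) + 1 := by omega
      rw [pyZipStarAux, if_neg (by simp [hfalse])]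
      rw [ih (xs.map (List.drop 1)) (by simpa using hne) (by omega)]
      rw [hm, List.range_succ_eq_map, List.map_cons, List.map_map, hdrop, colAt_zero]
      congr 1
      apply List.map_congr_left
      intro j _
      exact colAt_drop xs j

theorem pyZipStar_eq (xs : List (List Char)) :
    pyZipStar xs = (List.range (pyMinLen xs)).map (colAt xs) := by
  cases xs with
  | nil => rfl
  | cons r rs =>
    unfold pyZipStar
    have hfuel : pyMinLen (r :: rs) ≤ r.length := by
      unfold pyMinLen; simp only [List.map_cons]; exact fmin_le _ _
    simpa using pyZipStarAux_eq r.length (r :: rs) (by simp) hfuel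

theorem foldl_skip_filter (p : List Char → Bool) (l : List (List Char)) (acc : List String) :
    l.foldl (fun acc indices => if p indices then acc else acc ++ [String.ofList indices]) acc
      = acc ++ (l.filter (fun c => ! p c)).map String.ofList := by
  induction l generalizing acc with
  | nil => simp
  | cons x t ih =>
    by_cases h : p x = true
    · simp [h, ih]
    · simp only [Bool.not_eq_true] at h
      simp [h, ih]

theorem getD_map {α β : Type} (l : List α) (f : α → β) (i : Nat) (d : β) (d0 : α)
    (h : i < l.length) : (l.map f).getD i d = f (l.getD i d0) := by
  induction l generalizing i with
  | nil => simp at h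
  | cons x t ih =>
    cases i with
    | zero => rfl
    | succ k => exact ih k (by simpa using h)

theorem map_eq_range_getD {α β : Type} (l : List α) (f : α → β) (d : α) :
    l.map f = (List.range l.length).map (fun i => f (l.getD i d)) := by
  induction l with
  | nil => rfl
  | cons x t ih =>
    simp only [List.map_cons, List.length_cons, List.range_succ_eq_map, List.map_map]
    refine congrArg (f x :: ·) ?_
    rw [ih]
    apply List.map_congr_left
    intro i _
    rfl

theorem getD_zipWith {α β γ : Type} (f : α → β → γ) (a : List α) (b : List β)
    (i : Nat) (d : γ) (da : α) (db : β) (hi : i < a.length) (hib : i < b.length) :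
    (List.zipWith f a b).getD i d = f (a.getD i da) (b.getD i db) := by
  induction a generalizing b i with
  | nil => simp at hi
  | cons x t ih =>
    cases b with
    | nil => simp at hib
    | cons y u =>
      cases i with
      | zero => rfl
      | succ k => exact ih u k (by simpa using hi) (by simpa using hib)

theorem zip_eq_range_getD {α β : Type} (a : List α) (b : List β) (da : α) (db : β)
    (h : b.length ≤ a.length) :
    a.zip b = (List.range b.length).map (fun j => (a.getD j da, b.getD j db)) := by
  induction b generalizing a with
  | nil => simp
  | cons y u ih =>
    cases a with
    | nil => simp at h
    | cons x t =>
      simp only [List.zip_cons_cons, List.length_cons, List.range_succ_eq_map, List.map_cons,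
        List.map_map]
      refine congrArg ((x, y) :: ·) ?_
      rw [ih t (by simpa using h)]
      apply List.map_congr_left
      intro j _
      rfl

-- the fold of B's mask update, characterised over the running mask m
theorem bMask_foldl (rs : List (List Char)) (m : List Bool) :
    rs.foldl
      (fun mo line =>
        match mo with
        | none => some (line.map (fun c => c == '_'))
        | some m => some (List.zipWith (fun m c => m && (c == '_')) m line))
      (some m)
    = some ((List.range ((rs.map List.length).foldl min m.length)).map
        (fun j => m.getD j false && rs.all (fun r => r.getD j ' ' == '_'))) := by
  induction rs generalizing m with
  | nil =>
    simp only [List.foldl_nil, List.map_nil, List.all_nil, Bool.and_true, Option.some.injEq]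
    simpa using map_eq_range_getD m id false
  | cons r rs ih =>
    simp only [List.foldl_cons, List.map_cons]
    rw [ih (List.zipWith (fun m c => m && (c == '_')) m r)]
    congr 1
    have hlen : (List.zipWith (fun m c => m && (c == '_')) m r).length = min m.length r.length := by
      simp
    rw [hlen]
    have : ∀ ns : List Nat, ns.foldl min (min m.length r.length)
        = (r.length :: ns).foldl min m.length := by
      intro ns; simp [List.foldl_cons]
    rw [this]
    apply List.map_congr_left
    intro j hj
    have hjlt : j < (rs.map List.length).foldl min (min m.length r.length) :=
      List.mem_range.mp hj
    have hle := fmin_le (rs.map List.length) (min m.length r.length)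
    have hjm : j < m.length := by omega
    have hjr : j < r.length := by omega
    rw [getD_zipWith (fun m c => m && (c == '_')) m r j false false ' ' hjm hjr]
    simp [Bool.and_assoc]

theorem bMask_eq (rows : List (List Char)) (hne : rows ≠ []) :
    bMask rows = some ((List.range (pyMinLen rows)).map
      (fun j => (colAt rows j).all (fun c => c == '_'))) := by
  cases rows with
  | nil => exact absurd rfl hne
  | cons r rs =>
    unfold bMask
    simp only [List.foldl_cons]
    rw [bMask_foldl rs (r.map (fun c => c == '_'))]
    congr 1
    have hlen : (r.map (fun c => c == '_')).length = r.length := by simp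
    rw [hlen]
    have hm : pyMinLen (r :: rs) = (rs.map List.length).foldl min r.length := by
      unfold pyMinLen; simp
    rw [← hm]
    apply List.map_congr_left
    intro j hj
    have hjlt : j < pyMinLen (r :: rs) := List.mem_range.mp hj
    have hjr : j < r.length := by
      have := pyMinLen_le_mem (r :: rs) r (by simp)
      omega
    rw [getD_map r (fun c => c == '_') j false ' ' hjr]
    simp [colAt, Function.comp_def]

-- B equals the canonical form
theorem alt_eq_canon (lines : List String) :
    remove_underscore_indices_alt lines = canon lines := by
  cases lines with
  | nil => rfl
  | cons s ss =>
    set rows := (s :: ss).map String.toList with hrows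
    have hne : rows ≠ [] := by simp [hrows]
    set n := pyMinLen rows with hn
    set maskfn : Nat → Bool := fun j => (colAt rows j).all (fun c => c == '_') with hmf
    set F : List Char → List String := fun line =>
      ((line.zip ((List.range n).map maskfn)).filter (fun p => !p.2)).map
        (fun p => String.ofList [p.1]) with hF
    have halt : remove_underscore_indices_alt (s :: ss)
        = if (rows.map F).headD [] = [] then [] else rows.map F := by
      unfold remove_underscore_indices_alt
      rw [← hrows, bMask_eq rows hne, ← hn, ← hmf]
    rw [halt]
    have hrow : ∀ line ∈ rows,
        F line = (keepOf rows).map (fun j => String.ofList [line.getD j ' ']) := by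
      intro line hl
      simp only [hF]
      have hlen : ((List.range n).map maskfn).length ≤ line.length := by
        simp only [List.length_map, List.length_range]
        rw [hn]
        exact pyMinLen_le_mem rows line hl
      have hz : line.zip ((List.range n).map maskfn)
          = (List.range n).map (fun j => (line.getD j ' ', maskfn j)) := by
        rw [zip_eq_range_getD line ((List.range n).map maskfn) ' ' false hlen]
        simp only [List.length_map, List.length_range]
        apply List.map_congr_left
        intro j hj
        have hjn : j < n := List.mem_range.mp hj
        have h1 : ((List.range n).map maskfn).getD j false = maskfn ((List.range n).getD j 0) :=
          getD_map (List.range n) maskfn j false 0 (by simpa using hjn)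
        have h2 : (List.range n).getD j 0 = j := by
          simp [List.getD_eq_getElem?_getD, hjn]
        rw [h1, h2]
      rw [hz, List.filter_map, List.map_map]
      unfold keepOf
      rw [← hn]
      have hfc : (List.range n).filter
            ((fun (p : Char × Bool) => !p.2) ∘ (fun j => (line.getD j ' ', maskfn j)))
          = (List.range n).filter (fun j => !(colAt rows j).all (fun c => c == '_')) := by
        apply List.filter_congr
        intro j _
        simp [hmf]
      rw [hfc]
      apply List.map_congr_left
      intro j _
      simp
    rw [List.map_congr_left hrow]
    unfold canon
    by_cases hk : keepOf rows = []
    · rw [hk, if_pos rfl]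
      simp [hrows]
    · rw [if_neg hk]
      have hne2 : (rows.map (fun r =>
          (keepOf rows).map (fun j => String.ofList [r.getD j ' ']))).headD [] ≠ [] := by
        simp only [hrows, List.map_cons, List.headD_cons]
        simpa [hrows] using hk
      rw [if_neg hne2]

-- A equals the canonical form
theorem a_eq_canon (lines : List String) :
    remove_underscore_indices lines = canon lines := by
  unfold remove_underscore_indices canon
  set rows := lines.map String.toList with hrows
  set n := pyMinLen rows with hn
  rw [pyZipStar_eq rows, foldl_skip_filter, List.nil_append, List.filter_map, List.map_map]
  have hkeep : (List.range n).filter ((fun c => ! c.all (fun c => c == '_')) ∘ colAt rows)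
      = keepOf rows := by
    unfold keepOf
    rw [← hn]
    rfl
  rw [hkeep]
  by_cases hk : keepOf rows = []
  · rw [hk]
    simp [pyZipStar, pyZipStarAux]
  · rw [if_neg hk]
    have hml : List.map (String.toList ∘ String.ofList) (List.map (colAt rows) (keepOf rows))
        = (keepOf rows).map (colAt rows) := by
      rw [List.map_map]
      apply List.map_congr_left
      intro j _
      simp [Function.comp]
    rw [hml, pyZipStar_eq]
    have hconstlen : pyMinLen ((keepOf rows).map (colAt rows)) = rows.length := by
      apply pyMinLen_const
      · simpa using hk
      · intro l hl
        rcases List.mem_map.mp hl with ⟨j, _, rfl⟩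
        simp [colAt]
    rw [hconstlen]
    rw [map_eq_range_getD rows (fun r => (keepOf rows).map
      (fun j => String.ofList [r.getD j ' '])) []]
    rw [List.map_map]
    apply List.map_congr_left
    intro i hi
    have hi' : i < rows.length := List.mem_range.mp hi
    simp only [Function.comp, colAt, List.map_map]
    apply List.map_congr_left
    intro j _
    simp only [Function.comp, colAt]
    rw [getD_map rows (fun r => r.getD j ' ') i ' ' [] hi']

-- ===== VERDICT (by name: the statement is the Claim_ definition above) =====
theorem remove_underscore_indices_spec : Claim_equal_remove_underscore_indices := by
  intro lines _
  unfold Spec_remove_underscore_indices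
  rw [a_eq_canon, alt_eq_canon]
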